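-- pv_equiv track=rewrite | github.com/leeminHong1990/PaoDeKuai | kbengine/assets/scripts/common/utility.py | cards2baseLines
-- ===== SOURCE A (Python) =====
-- def cards2baseLines(cards):
--     tmp_dict = {}
--     for card in cards:
--         if tmp_dict.get(card):
--             tmp_dict[card] += 1
--         else:
--             tmp_dict[card] = 1
--     baseLineList = [0] * 12
--     for card in tmp_dict:
--         baseLineList[tmp_dict[card]] += 1
--     return baseLineList
-- ===== SOURCE B (Python) =====
-- def cards2baseLines(cards):
--     baseLineList = [0] * 12
--     s = sorted(cards)
--     i = 0
--     n = len(s)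
--     while i < n:
--         j = i
--         while j < n and s[j] == s[i]:
--             j += 1
--         baseLineList[j - i] += 1
--         i = j
--     return baseLineList
-- ===== Notes on version B (the rewrite author's own statement) =====
-- stated objective: alternative
-- what changed: Replaces the dict-based counting pass plus a loop over dict entries with sort-then-scan: sort the cards and walk the sorted list once, measuring each run of equal cards with an inner pointer and bumping the 12-slot histogram by the run length.
import Mathlib
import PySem

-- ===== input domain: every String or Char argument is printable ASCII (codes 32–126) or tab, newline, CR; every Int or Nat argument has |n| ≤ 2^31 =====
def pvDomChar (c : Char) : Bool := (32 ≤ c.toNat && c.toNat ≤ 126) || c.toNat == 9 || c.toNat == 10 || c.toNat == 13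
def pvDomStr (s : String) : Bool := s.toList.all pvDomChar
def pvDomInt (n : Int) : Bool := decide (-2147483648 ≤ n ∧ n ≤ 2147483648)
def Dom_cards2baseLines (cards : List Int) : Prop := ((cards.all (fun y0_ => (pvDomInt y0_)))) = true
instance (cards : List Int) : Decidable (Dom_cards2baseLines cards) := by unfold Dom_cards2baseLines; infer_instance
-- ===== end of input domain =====

-- B replaces A's dict-accumulation pass + loop over dict entries by sort-then-scan:
-- sort the cards and bump the histogram once per run of equal cards (objective: alternative).


-- ===== PORT A =====
-- 'if tmp_dict.get(card): tmp_dict[card] += 1 else: tmp_dict[card] = 1'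
def pvStepA (d : PySem.Dict Int Int) (card : Int) : PySem.Dict Int Int :=
  match d.get? card with
  | some v => if v ≠ 0 then d.insert card (v + 1) else d.insert card 1
  | none => d.insert card 1

def cards2baseLines (cards : List Int) : List Int :=
  let tmp_dict := cards.foldl pvStepA PySem.Dict.empty
  let baseLineList := List.replicate 12 (0 : Int)
  -- 'for card in tmp_dict: baseLineList[tmp_dict[card]] += 1'  (IndexError outside Pre_)
  tmp_dict.keys.foldl
    (fun bl card =>
      PySem.List.pySetD bl (tmp_dict.getD card 0)
        (PySem.List.pyGetD bl (tmp_dict.getD card 0) 0 + 1))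
    baseLineList

-- ===== PORT B =====
-- the outer 'while i < n' / inner 'while j < n and s[j] == s[i]' pair of Source B: each outer
-- step consumes one run of equal elements (the inner pointer scan = takeWhile/dropWhile)
-- and bumps slot 'j - i' (= run length) of the histogram.
def pvScanRuns (bl : List Int) (s : List Int) : List Int :=
  match s with
  | [] => bl
  | x :: rest =>
    let run : Int := ((rest.takeWhile (fun y => y == x)).length : Int) + 1
    pvScanRuns
      (PySem.List.pySetD bl run (PySem.List.pyGetD bl run 0 + 1))
      (rest.dropWhile (fun y => y == x))
termination_by s.length
decreasing_by
  simp only [List.length_cons]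
  exact Nat.lt_succ_of_le (List.length_dropWhile_le _ _)

def cards2baseLines_alt (cards : List Int) : List Int :=
  pvScanRuns (List.replicate 12 (0 : Int)) (PySem.List.sorted cards (fun x => x) false)

-- ===== PRECONDITION & SPEC =====
-- Pre_ excludes exactly the inputs where some card occurs 12 or more times: there
-- 'baseLineList[count] += 1' raises IndexError in Python A (and in B alike).
def Pre_cards2baseLines (cards : List Int) : Prop :=
  ∀ c ∈ cards, PySem.List.count cards c < 12
instance (cards : List Int) : Decidable (Pre_cards2baseLines cards) := by
  unfold Pre_cards2baseLines; infer_instance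
def pvWitness_cards2baseLines : List Int := [1, 1, 2]

def Spec_cards2baseLines (cards : List Int) (out : List Int) : Prop := out = cards2baseLines_alt cards
instance (cards : List Int) (out : List Int) : Decidable (Spec_cards2baseLines cards out) := by unfold Spec_cards2baseLines; infer_instance

-- ===== CLAIM (what is proved, stated in full; the proofs are below) =====
def Claim_equal_cards2baseLines : Prop := ∀ (cards : List Int), Dom_cards2baseLines cards → Pre_cards2baseLines cards → Spec_cards2baseLines cards (cards2baseLines cards)

-- ===== LEMMAS AND PROOFS =====

-- the single histogram-bump both loops perform, on a Nat index
def pvIncr (bl : List Int) (m : Nat) : List Int := bl.set m (bl.getD m 0 + 1)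

-- all values stored by A's accumulation loop are positive, so A's truthiness branch is
-- exactly counter's 'd[x] = d.get(x, 0) + 1'
theorem pvFoldA_eq_counter_step (l : List Int) (d : PySem.Dict Int Int)
    (hpos : ∀ k v, d.get? k = some v → 0 < v) :
    l.foldl pvStepA d = l.foldl (fun d x => d.insert x (d.getD x 0 + 1)) d := by
  induction l generalizing d with
  | nil => rfl
  | cons x l ih =>
    have hstep : pvStepA d x = d.insert x (d.getD x 0 + 1) := by
      unfold pvStepA
      cases h : d.get? x with
      | none => simp [PySem.Dict.getD, h]
      | some v =>
        have hv := hpos x v h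
        simp [PySem.Dict.getD, h, hv.ne']
    have hpos' : ∀ k v, (pvStepA d x).get? k = some v → 0 < v := by
      intro k v hk
      rw [hstep] at hk
      by_cases hkx : k = x
      · subst hkx
        rw [PySem.Dict.get?_insert_self] at hk
        cases hv : d.get? k with
        | none => simp [PySem.Dict.getD, hv] at hk; omega
        | some w => have := hpos k w hv; simp [PySem.Dict.getD, hv] at hk; omega
      · rw [PySem.Dict.get?_insert_of_ne _ _ hkx] at hk
        exact hpos k v hk
    simp only [List.foldl_cons, hstep]
    exact ih _ (hstep ▸ hpos')

theorem pvFoldA_eq_counter (cards : List Int) :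
    cards.foldl pvStepA PySem.Dict.empty = PySem.Dict.counter cards := by
  rw [pvFoldA_eq_counter_step cards PySem.Dict.empty
    (by intro k v h; simp [PySem.Dict.get?, PySem.Dict.empty] at h)]
  exact PySem.Dict.foldl_insert_getD_add_one_eq_counter cards

-- a bump at an out-of-range index is a no-op
theorem pvIncr_of_le (bl : List Int) (m : Nat) (h : bl.length ≤ m) : pvIncr bl m = bl := by
  unfold pvIncr
  exact List.set_eq_of_length_le h

theorem pvIncr_length (bl : List Int) (m : Nat) : (pvIncr bl m).length = bl.length := by
  simp [pvIncr]

-- two bumps commute (unconditionally)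
theorem pvIncr_comm (bl : List Int) (m n : Nat) :
    pvIncr (pvIncr bl m) n = pvIncr (pvIncr bl n) m := by
  by_cases hmn : m = n
  · subst hmn; rfl
  · by_cases hm : bl.length ≤ m
    · rw [pvIncr_of_le bl m hm, pvIncr_of_le (pvIncr bl n) m (by rw [pvIncr_length]; exact hm)]
    · by_cases hn : bl.length ≤ n
      · rw [pvIncr_of_le bl n hn, pvIncr_of_le (pvIncr bl m) n (by rw [pvIncr_length]; exact hn)]
      · unfold pvIncr
        simp only [List.getD_eq_getElem?_getD, List.getElem?_set_ne hmn,
          List.getElem?_set_ne (Ne.symm hmn)]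
        rw [List.set_comm]
        exact hmn

-- prepending an element absent from l commutes with Set accumulation
theorem pvFoldAdd_cons (l : List Int) (s : List Int) (x : Int) (hx : x ∉ l) :
    l.foldl PySem.Set.add (x :: s) = x :: l.foldl PySem.Set.add s := by
  induction l generalizing s with
  | nil => rfl
  | cons y l ih =>
    have hyx : y ≠ x := fun h => hx (h ▸ List.mem_cons_self)
    have hstep : PySem.Set.add (x :: s) y = x :: PySem.Set.add s y := by
      simp [PySem.Set.add, PySem.Set.contains, hyx]
      split <;> rfl
    simp only [List.foldl_cons, hstep]
    exact ih _ (fun h => hx (List.mem_cons_of_mem _ h))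

-- folding Set.add over a list of copies of an already-present element is a no-op
theorem pvFoldAdd_const (t : List Int) (s : List Int) (x : Int)
    (ht : ∀ y ∈ t, y = x) (hxs : x ∈ s) :
    t.foldl PySem.Set.add s = s := by
  induction t with
  | nil => rfl
  | cons y t ih =>
    have hy : y = x := ht y List.mem_cons_self
    have hstep : PySem.Set.add s y = s := by
      simp [PySem.Set.add, PySem.Set.contains, hy, hxs]
    simp only [List.foldl_cons, hstep]
    exact ih (fun z hz => ht z (List.mem_cons_of_mem _ hz))

-- in a sorted list, after dropping the leading run of x no x remains
theorem pvNotMem_dropWhile (x : Int) (rest : List Int) (hx_le : ∀ y ∈ rest, x ≤ y)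
    (hrest : rest.Pairwise (· ≤ ·)) : x ∉ rest.dropWhile (fun y => y == x) := by
  intro hmem
  cases hd : rest.dropWhile (fun y => y == x) with
  | nil => rw [hd] at hmem; simp at hmem
  | cons z d' =>
    rw [hd] at hmem
    have hne : rest.dropWhile (fun y => y == x) ≠ [] := by rw [hd]; simp
    have hhead := List.head_dropWhile_not (fun y => y == x) hne
    have hz : (rest.dropWhile (fun y => y == x)).head hne = z := by simp [hd]
    rw [hz] at hhead
    have hznex : z ≠ x := by simpa using hhead
    have hd_pair : (z :: d').Pairwise (· ≤ ·) :=
      hd ▸ List.Pairwise.sublist (List.dropWhile_sublist _) hrest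
    have hmemz : z ∈ rest := (List.dropWhile_sublist _).subset (hd ▸ List.mem_cons_self)
    rcases List.mem_cons.mp hmem with h | h
    · exact hznex h.symm
    · exact hznex (le_antisymm ((List.pairwise_cons.mp hd_pair).1 x h) (hx_le z hmemz))

-- B's run scan over a sorted list = a histogram bump per distinct value, by its count
theorem pvScanRuns_eq (N : Nat) (s : List Int) (bl : List Int)
    (hN : s.length ≤ N) (hsort : s.Pairwise (· ≤ ·)) :
    pvScanRuns bl s = ((PySem.Set.ofList s).map (fun x => s.count x)).foldl pvIncr bl := by
  induction N generalizing s bl with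
  | zero =>
    have : s = [] := List.eq_nil_of_length_eq_zero (Nat.le_zero.mp hN)
    subst this
    simp [pvScanRuns, PySem.Set.ofList]
  | succ N ih =>
    match s with
    | [] => simp [pvScanRuns, PySem.Set.ofList]
    | x :: rest =>
      have hx_le : ∀ y ∈ rest, x ≤ y := (List.pairwise_cons.mp hsort).1
      have hrest : rest.Pairwise (· ≤ ·) := (List.pairwise_cons.mp hsort).2
      have htd : rest.takeWhile (fun y => y == x) ++ rest.dropWhile (fun y => y == x) = rest :=
        List.takeWhile_append_dropWhile
      have ht : ∀ y ∈ rest.takeWhile (fun y => y == x), y = x :=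
        fun y hy => eq_of_beq (List.mem_takeWhile_imp (p := fun y => y == x) hy)
      have hd_pair : (rest.dropWhile (fun y => y == x)).Pairwise (· ≤ ·) :=
        List.Pairwise.sublist (List.dropWhile_sublist _) hrest
      have hxd : x ∉ rest.dropWhile (fun y => y == x) := pvNotMem_dropWhile x rest hx_le hrest
      have hd_len : (rest.dropWhile (fun y => y == x)).length ≤ N := by
        have h1 := List.length_dropWhile_le (fun y => y == x) rest
        have h2 : rest.length + 1 ≤ N + 1 := by simpa using hN
        omega
      rw [pvScanRuns]
      generalize hT : rest.takeWhile (fun y => y == x) = t at ht htd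
      generalize hD : rest.dropWhile (fun y => y == x) = d at hd_pair hxd hd_len htd
      clear hT hD
      subst htd
      have hcount_t : t.count x = t.length := List.count_eq_length.mpr (fun b hb => (ht b hb).symm)
      have hcount_d : d.count x = 0 := List.count_eq_zero.mpr hxd
      have hcount_x : (x :: (t ++ d)).count x = t.length + 1 := by
        simp [List.count_append, hcount_t, hcount_d]
      have hofList : PySem.Set.ofList (x :: (t ++ d)) = x :: PySem.Set.ofList d := by
        show List.foldl PySem.Set.add [] (x :: (t ++ d)) = x :: List.foldl PySem.Set.add [] d
        rw [List.foldl_cons]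
        have h0 : PySem.Set.add [] x = [x] := rfl
        rw [h0, List.foldl_append]
        rw [pvFoldAdd_const t [x] x ht (by simp)]
        exact pvFoldAdd_cons d [] x hxd
      have hcounts : ∀ y ∈ d, d.count y = (x :: (t ++ d)).count y := by
        intro y hy
        have hyx : y ≠ x := fun h => hxd (h ▸ hy)
        have hyt : y ∉ t := fun h => hyx (ht y h)
        simp [List.count_append, Ne.symm hyx, List.count_eq_zero.mpr hyt]
      have hrun : ((t.length : Int) + 1) = (((t.length + 1 : Nat) : Int)) := by push_cast; ring
      simp only [hrun, PySem.List.pySetD_natCast, PySem.List.pyGetD_natCast]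
      have hfold : bl.set (t.length + 1) (bl.getD (t.length + 1) 0 + 1)
          = pvIncr bl (t.length + 1) := rfl
      rw [hfold, ih _ _ hd_len hd_pair, hofList, List.map_cons, List.foldl_cons, hcount_x]
      congr 1
      apply List.map_congr_left
      intro y hy
      exact hcounts y ((PySem.Set.mem_ofList d y).mp hy)

-- A = B: both are folds of pvIncr over permutations of the same list of counts
theorem pv_main (cards : List Int) :
    cards2baseLines cards = cards2baseLines_alt cards := by
  simp only [cards2baseLines, cards2baseLines_alt]
  rw [pvFoldA_eq_counter, PySem.Dict.keys_counter]
  have hA : (PySem.Set.ofList cards).foldl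
      (fun bl card =>
        PySem.List.pySetD bl ((PySem.Dict.counter cards).getD card 0)
          (PySem.List.pyGetD bl ((PySem.Dict.counter cards).getD card 0) 0 + 1))
      (List.replicate 12 (0 : Int))
      = ((PySem.Set.ofList cards).map (fun x => cards.count x)).foldl pvIncr
          (List.replicate 12 (0 : Int)) := by
    rw [List.foldl_map]
    apply PySem.List.foldl_congr_mem
    intro bl card _
    rw [PySem.Dict.getD_counter]
    simp [pvIncr, PySem.List.pySetD_natCast, PySem.List.pyGetD_natCast]
  rw [hA]
  have hsorted_pw : (PySem.List.sorted cards (fun x => x) false).Pairwise (· ≤ ·) := by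
    have := PySem.List.sorted_pairwise (xs := cards) (key := fun x => x)
    simpa using this
  rw [pvScanRuns_eq (PySem.List.sorted cards (fun x => x) false).length _ _ le_rfl hsorted_pw]
  have hperm_s : (PySem.List.sorted cards (fun x => x) false).Perm cards :=
    PySem.List.sorted_perm cards (fun x => x) false
  have hkeys : (PySem.Set.ofList cards).Perm
      (PySem.Set.ofList (PySem.List.sorted cards (fun x => x) false)) := by
    apply (List.perm_ext_iff_of_nodup (PySem.Set.nodup_ofList _) (PySem.Set.nodup_ofList _)).mpr
    intro a
    rw [PySem.Set.mem_ofList, PySem.Set.mem_ofList]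
    exact ⟨fun h => hperm_s.mem_iff.mpr h, fun h => hperm_s.mem_iff.mp h⟩
  have hmap : ((PySem.Set.ofList (PySem.List.sorted cards (fun x => x) false)).map
      (fun x => (PySem.List.sorted cards (fun x => x) false).count x))
      = ((PySem.Set.ofList (PySem.List.sorted cards (fun x => x) false)).map
        (fun x => cards.count x)) :=
    List.map_congr_left (fun y _ => hperm_s.count_eq y)
  rw [hmap]
  exact (hkeys.map _).foldl_eq' (fun a _ b _ z => pvIncr_comm z a b) _

-- ===== VERDICT (by name: the statement is the Claim_ definition above) =====
theorem cards2baseLines_spec : Claim_equal_cards2baseLines := by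
  intro cards _ _
  exact pv_main cards
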